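-- pv_equiv track=rewrite | github.com/KOflyan/Snake | SimpleBattleship/Battleship.py | coordinates_1
-- ===== SOURCE A (Python) =====
-- def coordinates_1(x, y):
--     """Appending coordinates for size 1 ships."""
--     list_of_x = []  # x
--     list_of_y = []  # y
--
--     step_v = 24
--     for i in range(1, 6):  # appending all possible x and y to lists
--         step_h = 24
--         for j in range(1, 6):
--             list_of_x.append(x + step_h)
--             list_of_y.append(y - 240 + step_v)
--             step_h += 48
--         step_v += 48
--
--     return list_of_x, list_of_y
-- ===== SOURCE B (Python) =====
-- def coordinates_1(x, y):
--     """Appending coordinates for size 1 ships."""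
--     row_x = [x + 24 + 48 * j for j in range(5)]
--     list_of_x = row_x * 5
--     list_of_y = []
--     for i in range(5):
--         list_of_y.extend([y - 216 + 48 * i] * 5)
--     return list_of_x, list_of_y
-- ===== Notes on version B (the rewrite author's own statement) =====
-- stated objective: simpler
-- what changed: Replaces A's nested loop with two running step accumulators by a single x-offset row tiled 5 times plus one loop repeating each y value 5 times, exploiting that x depends only on the column and y only on the row.
import Mathlib
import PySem

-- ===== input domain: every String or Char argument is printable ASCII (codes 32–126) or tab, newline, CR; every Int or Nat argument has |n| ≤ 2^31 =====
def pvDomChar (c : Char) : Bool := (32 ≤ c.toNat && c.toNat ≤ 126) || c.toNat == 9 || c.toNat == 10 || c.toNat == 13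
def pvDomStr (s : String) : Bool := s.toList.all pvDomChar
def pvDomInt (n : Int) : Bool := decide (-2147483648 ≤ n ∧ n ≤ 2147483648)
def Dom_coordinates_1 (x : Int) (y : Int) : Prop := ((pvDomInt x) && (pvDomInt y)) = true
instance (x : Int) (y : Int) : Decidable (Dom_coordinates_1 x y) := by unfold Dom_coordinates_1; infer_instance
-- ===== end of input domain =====

-- B replaces A's nested loop with step accumulators by one tiled x-row and one
-- row-repetition loop for y (simpler decomposition; same O(1) cost).

-- ===== PORT A =====
-- Literal transliteration of A's nested loop: state (list_of_x, list_of_y, step_v),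
-- inner loop state (list_of_x, list_of_y, step_h).
def coordinates_1 (x : Int) (y : Int) : List Int × List Int :=
  let st :=
    (PySem.List.pyRange 1 6 1).foldl
      (fun (st : List Int × List Int × Int) _i =>
        let inner :=
          (PySem.List.pyRange 1 6 1).foldl
            (fun (s : List Int × List Int × Int) _j =>
              (s.1 ++ [x + s.2.2], s.2.1 ++ [y - 240 + st.2.2], s.2.2 + 48))
            (st.1, st.2.1, 24)
        (inner.1, inner.2.1, st.2.2 + 48))
      ([], [], 24)
  (st.1, st.2.1)

-- ===== PORT B =====
def coordinates_1_alt (x : Int) (y : Int) : List Int × List Int :=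
  let row_x := (PySem.List.pyRange 0 5 1).map (fun j => x + 24 + 48 * j)
  let list_of_x := row_x ++ row_x ++ row_x ++ row_x ++ row_x  -- row_x * 5
  let list_of_y :=
    (PySem.List.pyRange 0 5 1).foldl
      (fun acc i => acc ++ List.replicate 5 (y - 216 + 48 * i)) []
  (list_of_x, list_of_y)

-- ===== PRECONDITION & SPEC =====
def Spec_coordinates_1 (x : Int) (y : Int) (out : List Int × List Int) : Prop := out = coordinates_1_alt x y
instance (x : Int) (y : Int) (out : List Int × List Int) : Decidable (Spec_coordinates_1 x y out) := by unfold Spec_coordinates_1; infer_instance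

-- ===== CLAIM (what is proved, stated in full; the proofs are below) =====
def Claim_equal_coordinates_1 : Prop := ∀ (x : Int) (y : Int), Dom_coordinates_1 x y → Spec_coordinates_1 x y (coordinates_1 x y)

-- ===== LEMMAS AND PROOFS =====

-- ===== VERDICT (by name: the statement is the Claim_ definition above) =====
theorem coordinates_1_spec : Claim_equal_coordinates_1 := by
  intro x y _
  show (coordinates_1 x y) = coordinates_1_alt x y
  norm_num [coordinates_1, coordinates_1_alt, PySem.List.pyRange, List.range_succ,
    List.foldl, List.replicate, Int.toNat]
  ring_nf
  simp
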